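-- pv_equiv track=rewrite | github.com/Stefka85/Urbdan_module2 | module_2_hard.py | stone_trap
-- ===== SOURCE A (Python) =====
-- def stone_trap(n):
--     password = list()
--     for i in range (1,n):
--         for j in range (i+1,n):
--             if n % (i + j) == 0:
--                 an = str(i) + str(j)
--                 password.append(an)
--     return password
-- ===== SOURCE B (Python) =====
-- def stone_trap(n):
--     # Precompute the divisors of n once; per i, only divisor sums d = i + j are tried.
--     divisors = [d for d in range(1, n + 1) if n % d == 0]
--     password = []
--     for i in range(1, n):
--         for d in divisors:
--             j = d - i
--             if i < j < n:
--                 password.append(str(i) + str(j))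
--     return password
-- ===== Notes on version B (the rewrite author's own statement) =====
-- stated objective: faster
-- what changed: Instead of testing every pair (i,j) with a nested O(n^2) scan, B precomputes the sorted list of divisors of n once and, for each i, derives j = d - i from each divisor d, keeping it when i < j < n.
import Mathlib
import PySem

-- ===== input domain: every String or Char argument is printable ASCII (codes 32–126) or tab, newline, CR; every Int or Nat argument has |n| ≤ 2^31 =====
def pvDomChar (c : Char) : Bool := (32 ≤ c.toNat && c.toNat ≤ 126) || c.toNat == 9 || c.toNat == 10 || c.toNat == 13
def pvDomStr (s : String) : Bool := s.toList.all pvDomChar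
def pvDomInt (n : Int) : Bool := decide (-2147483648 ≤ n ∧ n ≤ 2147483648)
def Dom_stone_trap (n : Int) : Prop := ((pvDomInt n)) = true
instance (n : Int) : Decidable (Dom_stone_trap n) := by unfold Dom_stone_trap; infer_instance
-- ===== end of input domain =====

-- B replaces A's O(n^2) double scan by precomputing the divisors of n once and, per i,
-- trying only divisor sums d = i + j — measurably faster, same output.

-- ===== PORT A =====
def stone_trap (n : Int) : List String :=
  (PySem.List.pyRange 1 n 1).foldl (fun password i =>
    (PySem.List.pyRange (i + 1) n 1).foldl (fun password j =>
      if PySem.Int.mod n (i + j) = 0 then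
        password ++ [PySem.Int.toStr i ++ PySem.Int.toStr j]
      else password) password) []

-- ===== PORT B =====
def stone_trap_alt (n : Int) : List String :=
  let divisors := (PySem.List.pyRange 1 (n + 1) 1).filter (fun d => decide (PySem.Int.mod n d = 0))
  (PySem.List.pyRange 1 n 1).foldl (fun password i =>
    divisors.foldl (fun password d =>
      let j := d - i
      if i < j ∧ j < n then
        password ++ [PySem.Int.toStr i ++ PySem.Int.toStr j]
      else password) password) []

-- ===== PRECONDITION & SPEC =====
def Spec_stone_trap (n : Int) (out : List String) : Prop := out = stone_trap_alt n
instance (n : Int) (out : List String) : Decidable (Spec_stone_trap n out) := by unfold Spec_stone_trap; infer_instance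

-- ===== CLAIM (what is proved, stated in full; the proofs are below) =====
def Claim_equal_stone_trap : Prop := ∀ (n : Int), Dom_stone_trap n → Spec_stone_trap n (stone_trap n)

-- ===== LEMMAS AND PROOFS =====

-- shifting a unit-step range
theorem pv_pyRange_map_add (a b c : Int) :
    (PySem.List.pyRange a b 1).map (· + c) = PySem.List.pyRange (a + c) (b + c) 1 := by
  simp only [PySem.List.pyRange_one, List.map_map]
  have : (b + c - (a + c)).toNat = (b - a).toNat := by omega
  rw [this]
  apply List.map_congr_left
  intro k _
  simp only [Function.comp_apply]
  ring

-- a divisor test fails strictly above a positive n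
theorem pv_mod_ne_zero_of_gt (n d : Int) (hn : 0 < n) (hd : n < d) :
    PySem.Int.mod n d ≠ 0 := by
  rw [PySem.Int.mod_eq_emod_of_pos (by omega : (0:Int) < d)]
  rw [Int.emod_eq_of_lt (by omega) hd]
  omega

-- the inner loops agree for each admitted i
theorem pv_inner (n i : Int) (h1 : 1 ≤ i) (h2 : i < n) :
    ((PySem.List.pyRange (i + 1) n 1).filter
        (fun j => decide (PySem.Int.mod n (i + j) = 0))).map
      (fun j => PySem.Int.toStr i ++ PySem.Int.toStr j)
    = (((PySem.List.pyRange 1 (n + 1) 1).filter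
          (fun d => decide (PySem.Int.mod n d = 0))).filter
        (fun d => decide (i < d - i ∧ d - i < n))).map
      (fun d => PySem.Int.toStr i ++ PySem.Int.toStr (d - i)) := by
  rw [List.filter_filter]
  -- both double filters are the filter of the common range [1, n+i)
  have hbig :
      (PySem.List.pyRange 1 (n + 1) 1).filter
          (fun d => decide (i < d - i ∧ d - i < n) && decide (PySem.Int.mod n d = 0))
        = (PySem.List.pyRange (2 * i + 1) (n + i) 1).filter
          (fun d => decide (i < d - i ∧ d - i < n) && decide (PySem.Int.mod n d = 0)) := by
    have e1 : PySem.List.pyRange 1 (n + i) 1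
        = PySem.List.pyRange 1 (n + 1) 1 ++ PySem.List.pyRange (n + 1) (n + i) 1 :=
      PySem.List.pyRange_one_append 1 (n + 1) (n + i) (by omega) (by omega)
    have e2 : PySem.List.pyRange 1 (n + i) 1
        = PySem.List.pyRange 1 (2 * i + 1) 1 ++ PySem.List.pyRange (2 * i + 1) (n + i) 1 :=
      PySem.List.pyRange_one_append 1 (2 * i + 1) (n + i) (by omega) (by omega)
    have hhi : (PySem.List.pyRange (n + 1) (n + i) 1).filter
        (fun d => decide (i < d - i ∧ d - i < n) && decide (PySem.Int.mod n d = 0)) = [] := by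
      rw [List.filter_eq_nil_iff]
      intro d hd
      rw [PySem.List.mem_pyRange_one] at hd
      simp only [Bool.and_eq_true, decide_eq_true_eq, not_and]
      intro _
      exact fun h => pv_mod_ne_zero_of_gt n d (by omega) (by omega) h
    have hlo : (PySem.List.pyRange 1 (2 * i + 1) 1).filter
        (fun d => decide (i < d - i ∧ d - i < n) && decide (PySem.Int.mod n d = 0)) = [] := by
      rw [List.filter_eq_nil_iff]
      intro d hd
      rw [PySem.List.mem_pyRange_one] at hd
      simp only [Bool.and_eq_true, decide_eq_true_eq, not_and]
      intro hq
      omega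
    have := congrArg (List.filter
      (fun d => decide (i < d - i ∧ d - i < n) && decide (PySem.Int.mod n d = 0))) (e1.symm.trans e2)
    simpa only [List.filter_append, hhi, hlo, List.append_nil, List.nil_append] using this
  rw [hbig]
  have e : (2 * i + 1 : Int) = i + 1 + i := by ring
  rw [e, ← pv_pyRange_map_add (i + 1) n i]
  rw [List.filter_map, List.map_map]
  congr 1
  · funext j
    have hji : j + i - i = j := by ring
    simp only [Function.comp_apply, hji]
  · apply List.filter_congr
    intro j hj
    rw [PySem.List.mem_pyRange_one] at hj
    have hji : j + i - i = j := by ring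
    have hij : i + j = j + i := by ring
    have h1' : i < j := by omega
    have h2' : j < n := by omega
    simp only [Function.comp_apply, hji, hij]
    simp [h1', h2']

-- ===== VERDICT (by name: the statement is the Claim_ definition above) =====
theorem stone_trap_spec : Claim_equal_stone_trap := by
  intro n _
  unfold Spec_stone_trap stone_trap stone_trap_alt
  apply PySem.List.foldl_congr_mem
  intro acc i hi
  rw [PySem.List.mem_pyRange_one] at hi
  rw [PySem.List.foldl_append_ite (fun j => PySem.Int.mod n (i + j) = 0)
        (fun j => PySem.Int.toStr i ++ PySem.Int.toStr j)]
  rw [PySem.List.foldl_append_ite (fun d => i < d - i ∧ d - i < n)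
        (fun d => PySem.Int.toStr i ++ PySem.Int.toStr (d - i))]
  rw [pv_inner n i hi.1 hi.2]
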